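-- pv_equiv track=rewrite | github.com/incandescentxxc/Latency_Research | pilots/incomplete/incomplete_server.py | checkLocationinRegion
-- ===== SOURCE A (Python) =====
-- def checkLocationinRegion(regions, x_in, y_in, delays):
--     scaled = (x_in // 10, y_in // 10)
--     delay = 0
--     for key in regions.keys():
--         pos = regions[key]
--         for val in pos:
--             if val["x"] == scaled[0] and val["y"] == scaled[1]:
--                 if key == "fast_pos":
--                     delay = delays["fast"]
--                 if key == "slow_pos":
--                     delay = delays["slow"]
--                 if key == "med_pos":
--                     delay = delays["med"]
--                 if key == "quick_pos":
--                     delay = delays["quick"]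
--
--     return delay
-- ===== SOURCE B (Python) =====
-- _MAP = {"fast_pos": "fast", "slow_pos": "slow", "med_pos": "med", "quick_pos": "quick"}
--
-- def checkLocationinRegion(regions, x_in, y_in, delays):
--     # Build a coordinate -> delays-key index once (later writes win), then do one lookup.
--     index = {}
--     for key, pos in regions.items():
--         dk = _MAP.get(key)
--         if dk is None:
--             continue
--         for val in pos:
--             xv = val.get("x")
--             yv = val.get("y")
--             if xv is not None and yv is not None:
--                 index[(xv, yv)] = dk
--     dk = index.get((x_in // 10, y_in // 10))
--     return delays[dk] if dk is not None else 0
-- ===== Notes on version B (the rewrite author's own statement) =====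
-- stated objective: alternative
-- what changed: B replaces A's accumulator that rescans every region's positions and re-reads delays on each coordinate match by a single build of a coordinate->delays-key dict index (last write wins) followed by one lookup of the scaled point, touching delays only for the winning match.
import Mathlib
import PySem

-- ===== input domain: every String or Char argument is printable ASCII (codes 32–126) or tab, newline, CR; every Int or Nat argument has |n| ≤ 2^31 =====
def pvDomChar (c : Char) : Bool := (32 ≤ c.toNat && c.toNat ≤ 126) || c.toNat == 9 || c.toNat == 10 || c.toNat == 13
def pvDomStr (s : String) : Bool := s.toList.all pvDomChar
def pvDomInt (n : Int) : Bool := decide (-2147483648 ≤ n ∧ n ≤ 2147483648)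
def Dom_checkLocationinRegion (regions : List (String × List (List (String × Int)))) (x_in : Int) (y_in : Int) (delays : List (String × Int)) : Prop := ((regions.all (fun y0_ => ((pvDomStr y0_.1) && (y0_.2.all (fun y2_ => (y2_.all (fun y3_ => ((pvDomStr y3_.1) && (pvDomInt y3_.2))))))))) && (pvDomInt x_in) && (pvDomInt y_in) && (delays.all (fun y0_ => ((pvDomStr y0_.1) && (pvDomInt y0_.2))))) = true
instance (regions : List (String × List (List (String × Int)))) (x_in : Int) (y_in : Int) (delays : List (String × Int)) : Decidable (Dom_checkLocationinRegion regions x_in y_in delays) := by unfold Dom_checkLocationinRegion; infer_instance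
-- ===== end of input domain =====

-- B builds a coordinate→delay-key index once and answers with a single dict lookup (alternative
-- decomposition, same cost class); equivalence is about the return value only (neither mutates).

-- shared helper: the delays-subkey a region key selects ('fast_pos' → 'fast', …), none otherwise
def sKey (k : String) : Option String :=
  if k = "fast_pos" then some "fast"
  else if k = "slow_pos" then some "slow"
  else if k = "med_pos" then some "med"
  else if k = "quick_pos" then some "quick"
  else none

-- ===== PORT A =====
-- A's inner-loop body: the match test and the four sequential `if key == …` assignments.
-- val["x"] / val["y"] / delays[…] are totalized with get?/getD: where the Python raises
-- (KeyError) the input is outside Pre_checkLocationinRegion, so nothing is claimed there.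
def aStep (dd : PySem.Dict String Int) (scaled : Int × Int) (key : String) (delay : Int) (val : List (String × Int)) : Int :=
  let vd := PySem.Dict.ofList val
  if vd.get? "x" = some scaled.1 ∧ vd.get? "y" = some scaled.2 then
    let d1 := if key = "fast_pos" then dd.getD "fast" 0 else delay
    let d2 := if key = "slow_pos" then dd.getD "slow" 0 else d1
    let d3 := if key = "med_pos" then dd.getD "med" 0 else d2
    if key = "quick_pos" then dd.getD "quick" 0 else d3
  else delay

def checkLocationinRegion (regions : List (String × List (List (String × Int)))) (x_in : Int) (y_in : Int) (delays : List (String × Int)) : Int :=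
  let rd := PySem.Dict.ofList regions
  let dd := PySem.Dict.ofList delays
  let scaled := (PySem.Int.floordiv x_in 10, PySem.Int.floordiv y_in 10)
  rd.keys.foldl (fun delay key => (rd.getD key []).foldl (aStep dd scaled key) delay) 0

-- ===== PORT B =====
-- Source B's index-building step: record (x, y) ↦ delays-subkey when both coordinates are present
def bStep (dk : String) (idx : PySem.Dict (Int × Int) String) (val : List (String × Int)) : PySem.Dict (Int × Int) String :=
  match (PySem.Dict.ofList val).get? "x", (PySem.Dict.ofList val).get? "y" with
  | some xv, some yv => idx.insert (xv, yv) dk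
  | _, _ => idx

def bRegion (idx : PySem.Dict (Int × Int) String) (p : String × List (List (String × Int))) : PySem.Dict (Int × Int) String :=
  match sKey p.1 with
  | none => idx
  | some dk => p.2.foldl (bStep dk) idx

def checkLocationinRegion_alt (regions : List (String × List (List (String × Int)))) (x_in : Int) (y_in : Int) (delays : List (String × Int)) : Int :=
  let index := (PySem.Dict.ofList regions).items.foldl bRegion PySem.Dict.empty
  match index.get? (PySem.Int.floordiv x_in 10, PySem.Int.floordiv y_in 10) with
  | some dk => (PySem.Dict.ofList delays).getD dk 0
  | none => 0

-- ===== PRECONDITION & SPEC =====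
-- Pre_ is exactly where the Python A returns (no KeyError): every position dict has "x"; where
-- "x" matches the scaled x it also has "y"; and where a position of a special region matches the
-- scaled point, delays contains that region's subkey.
def Pre_checkLocationinRegion (regions : List (String × List (List (String × Int)))) (x_in : Int) (y_in : Int) (delays : List (String × Int)) : Prop :=
  ∀ k ∈ (PySem.Dict.ofList regions).keys,
    ∀ val ∈ (PySem.Dict.ofList regions).getD k [],
      (PySem.Dict.ofList val).contains "x" = true ∧
      ((PySem.Dict.ofList val).get? "x" = some (PySem.Int.floordiv x_in 10) →
        (PySem.Dict.ofList val).contains "y" = true ∧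
        ((PySem.Dict.ofList val).get? "y" = some (PySem.Int.floordiv y_in 10) →
          ∀ dk, sKey k = some dk → (PySem.Dict.ofList delays).contains dk = true))
instance (regions : List (String × List (List (String × Int)))) (x_in : Int) (y_in : Int) (delays : List (String × Int)) : Decidable (Pre_checkLocationinRegion regions x_in y_in delays) := by unfold Pre_checkLocationinRegion; infer_instance

def pvWitness_checkLocationinRegion : (List (String × List (List (String × Int)))) × Int × Int × (List (String × Int)) :=
  ([("fast_pos", [[("x", 1), ("y", 2)]]), ("other", [[("x", 0), ("y", 0)]])], 12, 25, [("fast", 7), ("slow", 9), ("med", 3), ("quick", 1)])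

def Spec_checkLocationinRegion (regions : List (String × List (List (String × Int)))) (x_in : Int) (y_in : Int) (delays : List (String × Int)) (out : Int) : Prop := out = checkLocationinRegion_alt regions x_in y_in delays
instance (regions : List (String × List (List (String × Int)))) (x_in : Int) (y_in : Int) (delays : List (String × Int)) (out : Int) : Decidable (Spec_checkLocationinRegion regions x_in y_in delays out) := by unfold Spec_checkLocationinRegion; infer_instance

-- ===== CLAIM (what is proved, stated in full; the proofs are below) =====
def Claim_equal_checkLocationinRegion : Prop := ∀ (regions : List (String × List (List (String × Int)))) (x_in : Int) (y_in : Int) (delays : List (String × Int)), Dom_checkLocationinRegion regions x_in y_in delays → Pre_checkLocationinRegion regions x_in y_in delays → Spec_checkLocationinRegion regions x_in y_in delays (checkLocationinRegion regions x_in y_in delays)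

-- ===== LEMMAS AND PROOFS =====

-- the simulation relation: A's accumulator against B's index, at the scaled point
def SimRel (dd : PySem.Dict String Int) (scaled : Int × Int) (idx : PySem.Dict (Int × Int) String) (delay : Int) : Prop :=
  match idx.get? scaled with
  | some dk => delay = dd.getD dk 0
  | none => delay = 0

theorem aStep_of_sKey_none {key : String} (h : sKey key = none) (dd : PySem.Dict String Int) (scaled : Int × Int) (delay : Int) (val : List (String × Int)) : aStep dd scaled key delay val = delay := by
  unfold sKey at h
  split_ifs at h with h1 h2 h3 h4
  simp [aStep, h1, h2, h3, h4]

theorem foldl_aStep_of_sKey_none {key : String} (h : sKey key = none) (dd : PySem.Dict String Int) (scaled : Int × Int) (pos : List (List (String × Int))) (delay : Int) : pos.foldl (aStep dd scaled key) delay = delay := by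
  induction pos generalizing delay with
  | nil => rfl
  | cons v t ih => simp [List.foldl_cons, aStep_of_sKey_none h, ih]

theorem aStep_of_sKey_some {key dk : String} (h : sKey key = some dk) (dd : PySem.Dict String Int) (scaled : Int × Int) (delay : Int) (val : List (String × Int)) : aStep dd scaled key delay val = (if (PySem.Dict.ofList val).get? "x" = some scaled.1 ∧ (PySem.Dict.ofList val).get? "y" = some scaled.2 then dd.getD dk 0 else delay) := by
  unfold sKey at h
  split_ifs at h with h1 h2 h3 h4 <;>
    (cases h; subst_vars; simp [aStep])

theorem simrel_bStep {dd : PySem.Dict String Int} {scaled : Int × Int} {idx : PySem.Dict (Int × Int) String} {delay : Int} {key dk : String} (hk : sKey key = some dk) (hr : SimRel dd scaled idx delay) (val : List (String × Int)) : SimRel dd scaled (bStep dk idx val) (aStep dd scaled key delay val) := by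
  rw [aStep_of_sKey_some hk]
  unfold bStep
  rcases hx : (PySem.Dict.ofList val).get? "x" with _ | xv
  · simpa [hx] using hr
  rcases hy : (PySem.Dict.ofList val).get? "y" with _ | yv
  · simpa [hy] using hr
  by_cases hs : scaled = (xv, yv)
  · subst hs
    rw [if_pos ⟨rfl, rfl⟩]
    show SimRel dd (xv, yv) (idx.insert (xv, yv) dk) (dd.getD dk 0)
    unfold SimRel
    rw [PySem.Dict.get?_insert]
    simp
  · have hcond : ¬ (some xv = some scaled.1 ∧ some yv = some scaled.2) := by
      rintro ⟨h1, h2⟩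
      exact hs (Prod.ext (Option.some.inj h1).symm (Option.some.inj h2).symm)
    rw [if_neg hcond]
    show SimRel dd scaled (idx.insert (xv, yv) dk) delay
    unfold SimRel
    rw [PySem.Dict.get?_insert, if_neg hs]
    exact hr

theorem simrel_bRegion {dd : PySem.Dict String Int} {scaled : Int × Int} {idx : PySem.Dict (Int × Int) String} {delay : Int} (hr : SimRel dd scaled idx delay) (p : String × List (List (String × Int))) : SimRel dd scaled (bRegion idx p) (p.2.foldl (aStep dd scaled p.1) delay) := by
  unfold bRegion
  rcases hk : sKey p.1 with _ | dk
  · simpa [foldl_aStep_of_sKey_none hk] using hr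
  · induction p.2 generalizing idx delay with
    | nil => simpa using hr
    | cons v t ih => exact ih (simrel_bStep hk hr v)

theorem simrel_items (dd : PySem.Dict String Int) (scaled : Int × Int) (l : List (String × List (List (String × Int)))) {idx : PySem.Dict (Int × Int) String} {delay : Int} (hr : SimRel dd scaled idx delay) : SimRel dd scaled (l.foldl bRegion idx) (l.foldl (fun d p => p.2.foldl (aStep dd scaled p.1) d) delay) := by
  induction l generalizing idx delay with
  | nil => simpa using hr
  | cons p t ih => exact ih (simrel_bRegion hr p)

-- A's fold over keys (with dict lookup) is the fold over items
theorem a_keys_eq_items (rd : PySem.Dict String (List (List (String × Int)))) (dd : PySem.Dict String Int) (scaled : Int × Int) (h : rd.keys.Nodup) : rd.keys.foldl (fun delay key => (rd.getD key []).foldl (aStep dd scaled key) delay) 0 = rd.items.foldl (fun d p => p.2.foldl (aStep dd scaled p.1) d) 0 := by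
  have hkeys : rd.keys = rd.items.map (·.1) := rfl
  rw [hkeys, List.foldl_map]
  exact PySem.List.foldl_congr_mem rd.items _ _ 0 (fun acc p hp => by
    rcases p with ⟨k, pos⟩
    rw [PySem.Dict.getD_of_mem_items rd hp h])

-- ===== VERDICT (by name: the statement is the Claim_ definition above) =====
theorem checkLocationinRegion_spec : Claim_equal_checkLocationinRegion := by
  intro regions x_in y_in delays _ _
  unfold Spec_checkLocationinRegion
  simp only [checkLocationinRegion, checkLocationinRegion_alt]
  rw [a_keys_eq_items _ _ _ (PySem.Dict.nodup_keys_ofList regions)]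
  have h0 : SimRel (PySem.Dict.ofList delays) (PySem.Int.floordiv x_in 10, PySem.Int.floordiv y_in 10) PySem.Dict.empty 0 := by
    unfold SimRel
    simp
  have h := simrel_items (PySem.Dict.ofList delays) (PySem.Int.floordiv x_in 10, PySem.Int.floordiv y_in 10) (PySem.Dict.ofList regions).items h0
  unfold SimRel at h
  rcases hg : ((PySem.Dict.ofList regions).items.foldl bRegion PySem.Dict.empty).get? (PySem.Int.floordiv x_in 10, PySem.Int.floordiv y_in 10) with _ | dk <;>
    (rw [hg] at h; simp only [hg]; exact h)
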